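-- pv_equiv track=rewrite | github.com/TheTerrarian03/Stickies | Old Versions/Stickies 2.1/Stickies (old)/functions.py | addCharAtPos
-- ===== SOURCE A (Python) =====
-- def addCharAtPos(string, position, whatToAdd):
--   #  convert to list
--   lst = []
--   for char in string:
--     lst.append(char)
--   # add
--   lst.insert(position, whatToAdd)
--   # convert to string
--   newString = ""
--   for char in lst:
--     newString += char
--   return newString
-- ===== SOURCE B (Python) =====
-- def addCharAtPos(string, position, whatToAdd):
--     return string[:position] + whatToAdd + string[position:]
-- ===== Notes on version B (the rewrite author's own statement) =====
-- stated objective: simpler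
-- what changed: Replaces the explicit char-by-char list build, list.insert and quadratic char-by-char string rebuild with a single two-slice string concatenation.
import Mathlib
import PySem

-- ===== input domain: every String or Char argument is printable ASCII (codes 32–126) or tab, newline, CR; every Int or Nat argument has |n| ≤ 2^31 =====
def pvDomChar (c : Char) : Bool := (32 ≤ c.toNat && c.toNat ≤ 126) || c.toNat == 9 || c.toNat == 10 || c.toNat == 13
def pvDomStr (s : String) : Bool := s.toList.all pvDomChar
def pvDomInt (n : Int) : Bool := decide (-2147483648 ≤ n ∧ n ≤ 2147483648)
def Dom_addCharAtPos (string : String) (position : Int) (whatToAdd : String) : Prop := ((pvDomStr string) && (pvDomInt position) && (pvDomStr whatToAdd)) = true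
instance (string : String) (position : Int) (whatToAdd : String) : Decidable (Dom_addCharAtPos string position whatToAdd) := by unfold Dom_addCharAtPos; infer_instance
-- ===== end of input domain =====

-- B replaces A's list build / list.insert / char-by-char rebuild with one two-slice string concatenation (simpler).

-- ===== PORT A =====
-- lst = []; for char in string: lst.append(char); lst.insert(position, whatToAdd);
-- newString = ""; for char in lst: newString += char
def addCharAtPos (string : String) (position : Int) (whatToAdd : String) : String :=
  let lst : List String := string.toList.foldl (fun acc c => acc ++ [String.singleton c]) []
  let lst2 : List String := PySem.List.insert lst position whatToAdd
  lst2.foldl (fun acc s => acc ++ s) ""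

-- ===== PORT B =====
-- return string[:position] + whatToAdd + string[position:]
def addCharAtPos_alt (string : String) (position : Int) (whatToAdd : String) : String :=
  PySem.Str.slice string none (some position) ++ whatToAdd ++ PySem.Str.slice string (some position) none

-- ===== PRECONDITION & SPEC =====
def Spec_addCharAtPos (string : String) (position : Int) (whatToAdd : String) (out : String) : Prop := out = addCharAtPos_alt string position whatToAdd
instance (string : String) (position : Int) (whatToAdd : String) (out : String) : Decidable (Spec_addCharAtPos string position whatToAdd out) := by unfold Spec_addCharAtPos; infer_instance

-- ===== CLAIM (what is proved, stated in full; the proofs are below) =====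
def Claim_equal_addCharAtPos : Prop := ∀ (string : String) (position : Int) (whatToAdd : String), Dom_addCharAtPos string position whatToAdd → Spec_addCharAtPos string position whatToAdd (addCharAtPos string position whatToAdd)

-- ===== LEMMAS AND PROOFS =====

theorem pv_take_drop_all {α : Type} (xs : List α) (k : Nat) :
    List.take (xs.length - k) (List.drop k xs) = List.drop k xs := by
  apply List.take_of_length_le; simp

-- Python's list.insert clamps exactly as the two one-sided slices do.
theorem pv_insert_eq_slices {α : Type} (xs : List α) (i : Int) (v : α) :
    PySem.List.insert xs i v
      = PySem.List.slice xs none (some i) ++ v :: PySem.List.slice xs (some i) none := by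
  simp only [PySem.List.insert, PySem.List.slice, PySem.List.sliceIndices, PySem.List.clampIdx]
  norm_num
  split_ifs with h1 h2
  · have e1 : (max (i + ↑xs.length) 0).toNat = 0 := by omega
    rw [e1]; simp
  · have e1 : (max (i + ↑xs.length) 0).toNat = (↑xs.length + i).toNat := by omega
    rw [e1, pv_take_drop_all]
  · have e1 : (min i ↑xs.length).toNat = min i.toNat xs.length := by omega
    rw [e1, pv_take_drop_all]

theorem pv_slice_map {α β : Type} (f : α → β) (xs : List α) (a? b? : Option Int) :
    PySem.List.slice (xs.map f) a? b? = (PySem.List.slice xs a? b?).map f := by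
  simp [PySem.List.slice]

theorem pv_flatten_singletons (l : List Char) :
    (l.map (String.toList ∘ String.singleton)).flatten = l := by
  induction l with
  | nil => rfl
  | cons h t ih => simp [ih]

theorem pv_foldl_append_strings (l : List String) (s : String) :
    (l.foldl (fun acc t => acc ++ t) s).toList = s.toList ++ (l.map String.toList).flatten := by
  induction l generalizing s with
  | nil => simp
  | cons h t ih => simp [List.foldl_cons, ih]

-- ===== VERDICT (by name: the statement is the Claim_ definition above) =====
theorem addCharAtPos_spec : Claim_equal_addCharAtPos := by
  intro s p w _
  show addCharAtPos s p w = addCharAtPos_alt s p w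
  apply String.toList_injective
  simp only [addCharAtPos, addCharAtPos_alt,
    PySem.List.foldl_append_singleton_eq_map, List.nil_append,
    pv_insert_eq_slices, pv_slice_map, pv_foldl_append_strings]
  simp [PySem.Str.slice, PySem.Chars.slice, List.map_map, pv_flatten_singletons]
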